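-- pv_equiv track=rewrite | github.com/Open-Athena/helico | scripts/pm/diff_dumps.py | _fmt_keylist
-- ===== SOURCE A (Python) =====
-- def _fmt_keylist(keys):
--     keys = sorted(keys)
--     if not keys:
--         return "  (none)"
--     w = max(len(k) for k in keys) + 2
--     lines = []
--     row = []
--     per_row = max(1, 80 // w)
--     for i, k in enumerate(keys):
--         row.append(k.ljust(w))
--         if (i + 1) % per_row == 0:
--             lines.append("  " + "".join(row))
--             row = []
--     if row:
--         lines.append("  " + "".join(row))
--     return "\n".join(lines)
-- ===== SOURCE B (Python) =====
-- def _fmt_keylist(keys):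
--     ks = sorted(keys)
--     if not ks:
--         return "  (none)"
--     w = max(map(len, ks)) + 2
--     per_row = max(1, 80 // w)
--     return "\n".join(
--         "  " + "".join(k.ljust(w) for k in ks[i:i + per_row])
--         for i in range(0, len(ks), per_row))
-- ===== Notes on version B (the rewrite author's own statement) =====
-- stated objective: simpler
-- what changed: Replaced the enumerate loop with running row buffer, (i+1)%per_row flush test and trailing leftover-flush by a single take/drop chunking loop that emits one finished line per chunk.
import Mathlib
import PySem

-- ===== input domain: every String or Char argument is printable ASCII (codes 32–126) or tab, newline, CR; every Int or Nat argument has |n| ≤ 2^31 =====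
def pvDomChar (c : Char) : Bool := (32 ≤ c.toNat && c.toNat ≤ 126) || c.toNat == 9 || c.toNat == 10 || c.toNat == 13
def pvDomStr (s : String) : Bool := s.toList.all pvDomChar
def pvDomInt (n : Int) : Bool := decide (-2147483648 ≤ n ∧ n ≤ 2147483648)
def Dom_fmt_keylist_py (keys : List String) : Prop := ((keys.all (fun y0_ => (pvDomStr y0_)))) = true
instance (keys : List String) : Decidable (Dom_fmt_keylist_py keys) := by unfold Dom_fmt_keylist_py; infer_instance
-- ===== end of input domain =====

-- B replaces A's enumerate/(i+1)%per_row accumulate-and-flush loop by one slice-chunking pass over range(0, len, per_row) (simpler, same result).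

-- k.ljust(w): pad on the right with spaces to width w (unchanged if already at least w wide); exact hand port
def pyLjust (s : String) (w : Int) : String :=
  String.ofList (s.toList ++ List.replicate (w - (s.toList.length : Int)).toNat ' ')

-- ===== PORT A =====
def fmt_keylist_py (keys : List String) : String :=
  let keys := PySem.List.sorted keys (fun k => k) false
  if keys = [] then "  (none)"
  else
    -- max(len(k) for k in keys): keys ≠ [] here so max? is some; getD's default is never used
    let w : Int := (PySem.List.max? (keys.map (fun k => PySem.Str.len k)) (fun x => x)).getD 0 + 2
    let per_row : Int := max 1 (PySem.Int.floordiv 80 w)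
    let st := (PySem.List.enumerate keys 0).foldl
      (fun (st : List String × List String) ik =>
        let row := st.2 ++ [pyLjust ik.2 w]
        if PySem.Int.mod (ik.1 + 1) per_row == 0 then
          (st.1 ++ ["  " ++ PySem.Str.join "" row], ([] : List String))
        else (st.1, row))
      (([] : List String), ([] : List String))
    let lines := if st.2 = [] then st.1 else st.1 ++ ["  " ++ PySem.Str.join "" st.2]
    PySem.Str.join "\n" lines

-- ===== PORT B =====
def fmt_keylist_py_alt (keys : List String) : String :=
  let ks := PySem.List.sorted keys (fun k => k) false
  if ks = [] then "  (none)"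
  else
    let w : Int := (PySem.List.max? (ks.map (fun k => PySem.Str.len k)) (fun x => x)).getD 0 + 2
    let per_row : Int := max 1 (PySem.Int.floordiv 80 w)
    PySem.Str.join "\n"
      ((PySem.List.pyRange 0 (PySem.List.len ks) per_row).map
        (fun i => "  " ++ PySem.Str.join ""
          ((PySem.List.slice ks (some i) (some (i + per_row))).map (fun k => pyLjust k w))))

-- ===== PRECONDITION & SPEC =====
def Spec_fmt_keylist_py (keys : List String) (out : String) : Prop := out = fmt_keylist_py_alt keys
instance (keys : List String) (out : String) : Decidable (Spec_fmt_keylist_py keys out) := by unfold Spec_fmt_keylist_py; infer_instance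

-- ===== CLAIM (what is proved, stated in full; the proofs are below) =====
def Claim_equal_fmt_keylist_py : Prop := ∀ (keys : List String), Dom_fmt_keylist_py keys → Spec_fmt_keylist_py keys (fmt_keylist_py keys)

-- ===== LEMMAS AND PROOFS =====

-- common reference shape: the list of finished lines, one per chunk of p keys
def altChunk (w : Int) (p : Nat) (hp : 0 < p) : List String → List String
  | [] => []
  | x :: xs =>
      ("  " ++ PySem.Str.join "" (((x :: xs).take p).map (fun k => pyLjust k w)))
        :: altChunk w p hp ((x :: xs).drop p)
termination_by l => l.length
decreasing_by simp; omega

-- A's loop body, abstracted over w and per_row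
def stepA (w per : Int) (st : List String × List String) (ik : Int × String) : List String × List String :=
  let row := st.2 ++ [pyLjust ik.2 w]
  if PySem.Int.mod (ik.1 + 1) per == 0 then
    (st.1 ++ ["  " ++ PySem.Str.join "" row], ([] : List String))
  else (st.1, row)

-- one (possibly partial) chunk: with j keys already buffered and j + |ys| ≤ p, the mod test
-- fires exactly on the last key of a full chunk
theorem foldl_stepA_chunk (w : Int) (p : Nat) (ys : List String) :
    ∀ (c j : Nat) (lines row : List String), j < p → j + ys.length ≤ p →
    List.foldl (stepA w p) (lines, row) (PySem.List.enumerate ys ((c * p + j : Nat) : Int)) =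
      if j + ys.length = p then
        (lines ++ ["  " ++ PySem.Str.join "" (row ++ ys.map (fun k => pyLjust k w))], ([] : List String))
      else (lines, row ++ ys.map (fun k => pyLjust k w)) := by
  induction ys with
  | nil =>
      intro c j lines row hj hle
      simp [PySem.List.enumerate_nil]
      omega
  | cons y ys ih =>
      intro c j lines row hj hle
      rw [PySem.List.enumerate_cons]
      simp only [List.foldl_cons]
      have hcast : ((c * p + j : Nat) : Int) + 1 = ((c * p + (j + 1) : Nat) : Int) := by push_cast; ring
      have hmod : PySem.Int.mod (((c * p + j : Nat) : Int) + 1) (p : Int) = (((j + 1) % p : Nat) : Int) := by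
        have hn : (c * p + (j + 1)) % p = (j + 1) % p := by rw [Nat.mul_comm]; exact Nat.mul_add_mod p c (j + 1)
        rw [hcast, PySem.Int.mod_natCast, hn]
      by_cases hfull : j + 1 = p
      · have hys : ys = [] := by
          cases ys with
          | nil => rfl
          | cons a l => simp at hle; omega
        subst hys
        simp only [stepA, hmod, hfull, List.length_cons, List.length_nil]
        simp [PySem.List.enumerate_nil]
      · have hne : (j + 1) % p = j + 1 := by
          apply Nat.mod_eq_of_lt; simp at hle; omega
        simp only [stepA, hmod, hne]
        have : ((((j + 1 : Nat)) : Int) == 0) = false := by simp; omega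
        simp only [this, Bool.false_eq_true, if_false]
        rw [hcast]
        rw [ih c (j + 1) lines (row ++ [pyLjust y w]) (by omega) (by simp at hle ⊢; omega)]
        simp only [List.length_cons, List.map_cons, List.append_assoc, List.cons_append, List.nil_append]
        by_cases h2 : j + 1 + ys.length = p
        · simp [h2, show j + (ys.length + 1) = p by omega]
        · simp [h2, show ¬ (j + (ys.length + 1) = p) by omega]

-- full run from a chunk boundary = chunk list
theorem foldl_stepA_eq_altChunk (w : Int) (p : Nat) (hp : 0 < p) :
    ∀ (xs : List String) (c : Nat) (lines : List String),
    (if (List.foldl (stepA w p) (lines, ([] : List String)) (PySem.List.enumerate xs ((c * p : Nat) : Int))).2 = []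
     then (List.foldl (stepA w p) (lines, ([] : List String)) (PySem.List.enumerate xs ((c * p : Nat) : Int))).1
     else (List.foldl (stepA w p) (lines, ([] : List String)) (PySem.List.enumerate xs ((c * p : Nat) : Int))).1
            ++ ["  " ++ PySem.Str.join "" (List.foldl (stepA w p) (lines, ([] : List String)) (PySem.List.enumerate xs ((c * p : Nat) : Int))).2]) =
      lines ++ altChunk w p hp xs := by
  intro xs
  induction xs using altChunk.induct p hp with
  | case1 =>
      intro c lines
      simp [PySem.List.enumerate_nil, altChunk]
  | case2 x xs ih =>
      intro c lines
      by_cases hlen : (x :: xs).length ≤ p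
      · have htake : (x :: xs).take p = x :: xs := List.take_of_length_le hlen
        have hdrop : (x :: xs).drop p = [] := List.drop_eq_nil_of_le hlen
        have h := foldl_stepA_chunk w p (x :: xs) c 0 lines [] hp (by simpa using hlen)
        rw [show c * p + 0 = c * p from rfl] at h
        rw [h]
        by_cases hfull : 0 + (x :: xs).length = p
        · simp only [if_pos hfull]
          simp [altChunk, htake, hdrop]
        · simp only [if_neg hfull]
          simp [altChunk, htake, hdrop]
      · have hsplit : x :: xs = (x :: xs).take p ++ (x :: xs).drop p := (List.take_append_drop p (x :: xs)).symm
        have hlentake : ((x :: xs).take p).length = p := by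
          rw [List.length_take]
          omega
        conv_lhs => rw [hsplit]
        rw [PySem.List.enumerate_append, List.foldl_append]
        have h := foldl_stepA_chunk w p ((x :: xs).take p) c 0 lines [] hp (by omega)
        rw [show c * p + 0 = c * p from rfl] at h
        rw [h, if_pos (show 0 + ((x :: xs).take p).length = p by omega)]
        have hstart : ((c * p : Nat) : Int) + ((x :: xs).take p).length = (((c + 1) * p : Nat) : Int) := by
          rw [hlentake]; push_cast; ring
        rw [hstart]
        rw [ih (c + 1) (lines ++ ["  " ++ PySem.Str.join "" ([] ++ ((x :: xs).take p).map (fun k => pyLjust k w))])]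
        conv_rhs => rw [altChunk]
        simp

-- ceiling-count split: range(0, n, p) starts with 0 and continues with p-shifted range(0, n-p, p)
theorem pyRange_chunk_cons (p n : Nat) (hp : 0 < p) (hn : 0 < n) :
    PySem.List.pyRange 0 ((n : Nat) : Int) (p : Int) =
      (0 : Int) :: (PySem.List.pyRange 0 (((n - p : Nat)) : Int) (p : Int)).map (fun i => i + (p : Int)) := by
  have hps : (0 : Int) < (p : Int) := by exact_mod_cast hp
  rw [PySem.List.pyRange_of_pos 0 _ hps, PySem.List.pyRange_of_pos 0 _ hps]
  have he1 : ((n : Int) - 0 + (p : Int) - 1) = ((n + p - 1 : Nat) : Int) := by omega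
  have hd1 : (((n + p - 1 : Nat) : Int) / (p : Int)).toNat = (n + p - 1) / p := by
    rw [← Int.natCast_div]; exact Int.toNat_natCast _
  by_cases hcase : p < n
  · have he2 : (((n - p : Nat) : Int) - 0 + (p : Int) - 1) = ((n - 1 : Nat) : Int) := by omega
    have hd2 : (((n - 1 : Nat) : Int) / (p : Int)).toNat = (n - 1) / p := by
      rw [← Int.natCast_div]; exact Int.toNat_natCast _
    rw [if_pos (by exact_mod_cast hn), if_pos (by exact_mod_cast (show (0:Int) < ((n - p : Nat):Int) by omega))]
    rw [he1, hd1, he2, hd2]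
    have hcount : (n + p - 1) / p = (n - 1) / p + 1 := by
      have : n + p - 1 = (n - 1) + p := by omega
      rw [this, Nat.add_div_right _ hp]
    rw [hcount, List.range_succ_eq_map]
    simp only [List.map_cons, List.map_map]
    refine List.cons_eq_cons.mpr ⟨by simp, ?_⟩
    apply List.map_congr_left
    intro k _
    simp only [Function.comp]
    push_cast
    ring
  · have hz : n - p = 0 := by omega
    rw [if_pos (by exact_mod_cast hn), if_neg (by simp [hz])]
    rw [he1, hd1]
    have hcount : (n + p - 1) / p = 1 := Nat.div_eq_of_lt_le (by omega) (by omega)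
    rw [hcount]
    simp

-- B's comprehension over range(0, len, p) with slices = the chunk list
theorem map_pyRange_slice_eq_altChunk (w : Int) (p : Nat) (hp : 0 < p) :
    ∀ (ks : List String),
    (PySem.List.pyRange 0 (PySem.List.len ks) (p : Int)).map
        (fun i => "  " ++ PySem.Str.join ""
          ((PySem.List.slice ks (some i) (some (i + (p : Int)))).map (fun k => pyLjust k w))) =
      altChunk w p hp ks := by
  intro ks
  induction ks using altChunk.induct p hp with
  | case1 =>
      simp [PySem.List.len_eq, PySem.List.pyRange_of_pos 0 0 (show (0:Int) < (p:Int) by exact_mod_cast hp), altChunk]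
  | case2 x xs ih =>
      have hlen : PySem.List.len (x :: xs) = ((xs.length + 1 : Nat) : Int) := by
        simp [PySem.List.len_eq]
      have hlend : PySem.List.len ((x :: xs).drop p) = (((xs.length + 1) - p : Nat) : Int) := by
        simp [PySem.List.len_eq]
      rw [hlen, pyRange_chunk_cons p (xs.length + 1) hp (by omega)]
      rw [List.map_cons, List.map_map]
      conv_rhs => rw [altChunk]
      congr 1
      · -- head: slice ks 0 p = take p
        have : ((0 : Int) + (p : Int)) = ((p : Nat) : Int) := by omega
        rw [this]
        rw [show PySem.List.slice (x :: xs) (some (0 : Int)) (some ((p : Nat) : Int)) =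
              PySem.List.slice (x :: xs) (some ((0 : Nat) : Int)) (some ((p : Nat) : Int)) from rfl]
        rw [PySem.List.slice_natCast]
        simp
      · -- tail: shift by p lands in drop p
        rw [← hlend]
        rw [← ih]
        apply List.map_congr_left
        intro i hi
        have hmem := (PySem.List.mem_pyRange_iff_of_pos (show (0:Int) < (p:Int) by exact_mod_cast hp) i).mp hi
        obtain ⟨h0, _, _⟩ := hmem
        obtain ⟨m, rfl⟩ := Int.eq_ofNat_of_zero_le h0
        have e1 : ((m : Int) + (p : Int)) = ((m + p : Nat) : Int) := by omega
        have hs : PySem.List.slice (x :: xs) (some ((m : Int) + (p : Int))) (some ((m : Int) + (p : Int) + (p : Int)))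
            = PySem.List.slice ((x :: xs).drop p) (some ((m : Nat) : Int)) (some (((m : Nat) : Int) + (p : Int))) := by
          rw [e1]
          conv_rhs => rw [← e1]
          rw [PySem.List.slice_natCast_add, PySem.List.slice_natCast_add]
          rw [List.drop_drop]
          congr 2
          omega
        simp only [Function.comp_apply]
        rw [hs]

-- ===== VERDICT (by name: the statement is the Claim_ definition above) =====
theorem fmt_keylist_py_spec : Claim_equal_fmt_keylist_py := by
  intro keys _
  unfold Spec_fmt_keylist_py fmt_keylist_py fmt_keylist_py_alt
  by_cases h : PySem.List.sorted keys (fun k => k) false = []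
  · simp [h]
  · simp only [if_neg h]
    set ks := PySem.List.sorted keys (fun k => k) false with hks
    set w : Int := (PySem.List.max? (ks.map (fun k => PySem.Str.len k)) (fun x => x)).getD 0 + 2 with hw
    set per_row : Int := max 1 (PySem.Int.floordiv 80 w) with hper
    have hpos : 1 ≤ per_row := le_max_left _ _
    have hcast : (per_row.toNat : Int) = per_row := Int.toNat_of_nonneg (by omega)
    have hp : 0 < per_row.toNat := by omega
    have key := foldl_stepA_eq_altChunk w per_row.toNat hp ks 0 []
    rw [hcast] at key
    simp only [Nat.zero_mul, Nat.cast_zero, List.nil_append] at key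
    have key2 := map_pyRange_slice_eq_altChunk w per_row.toNat hp ks
    rw [hcast] at key2
    rw [show (fun (st : List String × List String) (ik : Int × String) =>
          if PySem.Int.mod (ik.1 + 1) per_row == 0 then
            (st.1 ++ ["  " ++ PySem.Str.join "" (st.2 ++ [pyLjust ik.2 w])], ([] : List String))
          else (st.1, st.2 ++ [pyLjust ik.2 w])) = stepA w per_row from rfl]
    rw [key, key2]
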